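-- pv_equiv track=rewrite | github.com/quangis/quangis-workflow | quangis_workflow_synthesis/semdim_projector.py | project2Dimensions
-- ===== SOURCE A (Python) =====
-- def project2Dimensions(nodes, listoftrees):
--     """
--     This method projects given nodes to all dimensions given as a list of
--     dimensions (as subsumption trees). Any node that is subsumed by at least
--     one tree can be projected to the closest parent in that tree which belongs
--     to its core. The index of the list indicates the dimension. If a node
--     cannot be projected to a given dimension, then project maps to None.
--     """
--
--     project = {}
--     notcore = set()
--     for n in nodes:
--         project[n] = []
--         for idx, tree in enumerate(listoftrees):
--             parent = tree[1]
--             distance = tree[0]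
--             p = None
--             if n in distance.keys():
--                 p = n
--                 #p needs to belong to the core of the given dimension (tree)
--                 while not dimcore(p, parent, idx, listoftrees):
--                     notcore.add(p)
--                     p = parent[p]
--             project[n].append(p)
--     #remove nodes that cannot be projected in any way
--     project = {key: val for key, val in project.items() if set(val) != {None}}
--     return (project, notcore)
--
-- def dimcore(n, parent, idxc, listoftrees):
--     """
--     Determines whether a given node is at the core of a dimension (i.e. not
--     subsumed by any other dimension)
--     """
--     out = True
--     for idx, tree in enumerate(listoftrees):
--         if idx != idxc:
--             distance = tree[0]
--             if n in distance.keys():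
--                 out = False
--                 break
--     return out
-- ===== SOURCE B (Python) =====
-- def project2Dimensions(nodes, listoftrees):
--     """Staged reimplementation: a counting pass replaces the rescanning core
--     test (a key is core for a dimension iff no OTHER tree contains it), each
--     (node, dimension) cell is resolved by a pure function returning the core
--     ancestor together with the non-core nodes it walked through, and the two
--     outputs are assembled afterwards from the table of cells."""
--     belong = {}
--     for distance, _parent in listoftrees:
--         for k in distance:
--             belong[k] = belong.get(k, 0) + 1
--
--     def resolve(p, distance, parent):
--         # (closest core ancestor of p, non-core nodes visited, in order)
--         path = []
--         while belong.get(p, 0) > (1 if p in distance else 0):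
--             path.append(p)
--             p = parent[p]
--         return p, path
--
--     def cell(n, distance, parent):
--         if n in distance:
--             return resolve(n, distance, parent)
--         return None, []
--
--     cells = [[cell(n, d, par) for d, par in listoftrees] for n in nodes]
--     notcore = set(p for row in cells for (_a, path) in row for p in path)
--     project = {}
--     for n, row in zip(nodes, cells):
--         ancestors = [a for (a, _path) in row]
--         if set(ancestors) != {None}:
--             project[n] = ancestors
--     return (project, notcore)
-- ===== Notes on version B (the rewrite author's own statement) =====
-- stated objective: alternative
-- what changed: A decides coreness of every visited node by rescanning all other dimension trees (dimcore) while threading a mutable dict and set through nested loops; B first counts in one pass how many trees contain each key and uses that counter as the core test, computes every (node,dimension) cell with a pure resolver returning (core ancestor, visited non-core path), and assembles notcore and the filtered projection dict from that table in separate staged passes.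
import Mathlib
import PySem

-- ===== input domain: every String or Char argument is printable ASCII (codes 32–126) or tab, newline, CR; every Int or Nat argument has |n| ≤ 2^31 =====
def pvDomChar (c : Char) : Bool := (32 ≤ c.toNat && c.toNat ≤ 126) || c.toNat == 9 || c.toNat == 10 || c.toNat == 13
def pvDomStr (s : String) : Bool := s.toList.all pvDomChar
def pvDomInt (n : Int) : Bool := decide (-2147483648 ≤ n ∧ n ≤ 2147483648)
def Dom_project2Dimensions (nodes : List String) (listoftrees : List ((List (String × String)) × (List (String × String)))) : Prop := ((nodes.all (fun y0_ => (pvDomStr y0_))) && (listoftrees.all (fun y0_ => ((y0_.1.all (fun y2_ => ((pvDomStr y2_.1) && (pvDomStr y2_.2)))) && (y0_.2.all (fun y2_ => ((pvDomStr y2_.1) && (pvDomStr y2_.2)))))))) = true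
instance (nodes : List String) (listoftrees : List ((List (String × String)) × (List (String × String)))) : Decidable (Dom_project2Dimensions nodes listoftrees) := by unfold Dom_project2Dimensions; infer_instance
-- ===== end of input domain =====

-- B replaces A's per-step scan over all other trees (dimcore) by a one-pass counter of
-- tree membership and computes the result in stages from a pure table of per-cell
-- (ancestor, visited-path) pairs instead of threading a dict and a set through the loops.


-- shared by both ports: Python's `set(val) != {None}` (both sources contain this literal test)
def setNeNone (row : List (Option String)) : Bool :=
  !(PySem.Set.equal (PySem.Set.ofList row) [(none : Option String)])

-- ===== PORT A =====
-- dimcore's `for idx, tree in enumerate(...)` with break, idx carried explicitly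
def dimcoreAux (n : String) (idxc idx : Nat)
    (ts : List ((List (String × String)) × (List (String × String)))) : Bool :=
  match ts with
  | [] => true
  | t :: rest =>
      if (idx != idxc) && (PySem.Dict.ofList t.1).contains n then false
      else dimcoreAux n idxc (idx + 1) rest

def dimcore (n : String) (_parent : List (String × String)) (idxc : Nat)
    (listoftrees : List ((List (String × String)) × (List (String × String)))) : Bool :=
  dimcoreAux n idxc 0 listoftrees

-- the `while not dimcore(...)` loop; fuel only totalises it (Python diverges / raises
-- KeyError exactly on the inputs Pre_ excludes); on fuel 0 / missing key it returns p as-is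
def walkA (fuel : Nat) (p : String) (parent : List (String × String)) (idx : Nat)
    (trees : List ((List (String × String)) × (List (String × String))))
    (nc : PySem.Set String) : String × PySem.Set String :=
  match fuel with
  | 0 => (p, nc)
  | f + 1 =>
      if dimcore p parent idx trees then (p, nc)
      else
        let nc' := PySem.Set.add nc p
        match (PySem.Dict.ofList parent).get? p with
        | none => (p, nc')          -- Python raises KeyError here (outside Pre_)
        | some q => walkA f q parent idx trees nc'

-- the `for idx, tree in enumerate(listoftrees)` loop building project[n]
def rowA (n : String) (idx : Nat)
    (ts alltrees : List ((List (String × String)) × (List (String × String))))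
    (nc : PySem.Set String) : List (Option String) × PySem.Set String :=
  match ts with
  | [] => ([], nc)
  | t :: rest =>
      let w :=
        if (PySem.Dict.ofList t.1).contains n then
          let r := walkA (t.2.length + 1) n t.2 idx alltrees nc
          ((some r.1 : Option String), r.2)
        else ((none : Option String), nc)
      let rest' := rowA n (idx + 1) rest alltrees w.2
      (w.1 :: rest'.1, rest'.2)

def project2Dimensions (nodes : List String) (listoftrees : List ((List (String × String)) × (List (String × String)))) : (List (String × List (Option String))) × List String :=
  let st := nodes.foldl
    (fun (st : PySem.Dict String (List (Option String)) × PySem.Set String) n =>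
      let r := rowA n 0 listoftrees listoftrees st.2
      (st.1.insert n r.1, r.2))
    (PySem.Dict.empty, PySem.Set.empty)
  -- `project = {key: val for key, val in project.items() if set(val) != {None}}`
  ((st.1.items.filter (fun kv => setNeNone kv.2)), st.2)

-- ===== PORT B =====
-- one counting pass: belong[k] = number of trees whose distance dict contains k
def belongOf (trees : List ((List (String × String)) × (List (String × String)))) :
    PySem.Dict String Int :=
  trees.foldl
    (fun d t => ((PySem.Dict.ofList t.1).keys).foldl
      (fun d k => d.insert k (d.getD k 0 + 1)) d)
    PySem.Dict.empty

-- `resolve`: pure — returns the core ancestor and the non-core nodes walked through,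
-- in visit order (fuel totalises the while loop; on fuel 0 / missing parent it stops)
def resolveB (fuel : Nat) (p : String) (dist parent : List (String × String))
    (belong : PySem.Dict String Int) : String × List String :=
  match fuel with
  | 0 => (p, [])
  | f + 1 =>
      if belong.getD p 0 > (if (PySem.Dict.ofList dist).contains p then 1 else 0) then
        match (PySem.Dict.ofList parent).get? p with
        | none => (p, [p])          -- Python raises KeyError here (outside Pre_)
        | some q =>
            let r := resolveB f q dist parent belong
            (r.1, p :: r.2)
      else (p, [])

-- `cell`: one (node, dimension) entry of the table
def cellB (n : String) (t : (List (String × String)) × (List (String × String)))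
    (belong : PySem.Dict String Int) : Option String × List String :=
  if (PySem.Dict.ofList t.1).contains n then
    let r := resolveB (t.2.length + 1) n t.1 t.2 belong
    ((some r.1 : Option String), r.2)
  else ((none : Option String), [])

def rowCellsB (n : String)
    (ts : List ((List (String × String)) × (List (String × String))))
    (belong : PySem.Dict String Int) : List (Option String × List String) :=
  ts.map (fun t => cellB n t belong)

def project2Dimensions_alt (nodes : List String) (listoftrees : List ((List (String × String)) × (List (String × String)))) : (List (String × List (Option String))) × List String :=
  let belong := belongOf listoftrees
  let cells := nodes.map (fun n => rowCellsB n listoftrees belong)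
  let notcore := PySem.Set.ofList (cells.flatMap (fun row => row.flatMap Prod.snd))
  let project := (nodes.zip cells).foldl
    (fun (d : PySem.Dict String (List (Option String))) nr =>
      let ancestors := nr.2.map Prod.fst
      if setNeNone ancestors then d.insert nr.1 ancestors else d)
    PySem.Dict.empty
  (project.items, notcore)

-- ===== PRECONDITION & SPEC =====
-- helpers for Pre_ (independent of both ports): k-step parent ancestor, core test
def pvAncest (parent : List (String × String)) (n : String) (k : Nat) : Option String :=
  match k with
  | 0 => some n
  | j + 1 => (pvAncest parent n j).bind (fun p => List.lookup p parent)

def pvIsCore (trees : List ((List (String × String)) × (List (String × String))))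
    (idx : Nat) (q : String) : Bool :=
  trees.zipIdx.all (fun ti => ti.2 == idx || !((ti.1.1.map Prod.fst).contains q))

def pvChainOK (trees : List ((List (String × String)) × (List (String × String))))
    (idx : Nat) (parent : List (String × String)) (n : String) : Bool :=
  (List.range (parent.length + 1)).any (fun k =>
    (match pvAncest parent n k with
     | some q => pvIsCore trees idx q
     | none => false) &&
    (List.range k).all (fun j =>
      match pvAncest parent n j with
      | some r => !pvIsCore trees idx r
      | none => false))

-- Pre_ excludes exactly the inputs on which Python A does not return: where some
-- projection walk either hits a node without a parent (KeyError) or cycles without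
-- ever reaching a core node (the while loop diverges).
def Pre_project2Dimensions (nodes : List String) (listoftrees : List ((List (String × String)) × (List (String × String)))) : Prop :=
  ∀ n ∈ nodes, ∀ ti ∈ listoftrees.zipIdx,
    (ti.1.1.map Prod.fst).contains n = true →
    pvChainOK listoftrees ti.2 ti.1.2 n = true

instance (nodes : List String) (listoftrees : List ((List (String × String)) × (List (String × String)))) : Decidable (Pre_project2Dimensions nodes listoftrees) := by
  unfold Pre_project2Dimensions; infer_instance

def pvWitness_project2Dimensions : List String × (List ((List (String × String)) × (List (String × String)))) :=
  (["a"], [([("a", "1"), ("b", "1")], [("a", "b")]), ([("a", "1")], [("a", "c")])])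

def Spec_project2Dimensions (nodes : List String) (listoftrees : List ((List (String × String)) × (List (String × String)))) (out : (List (String × List (Option String))) × List String) : Prop := out = project2Dimensions_alt nodes listoftrees
instance (nodes : List String) (listoftrees : List ((List (String × String)) × (List (String × String)))) (out : (List (String × List (Option String))) × List String) : Decidable (Spec_project2Dimensions nodes listoftrees out) := by unfold Spec_project2Dimensions; infer_instance

-- ===== CLAIM (what is proved, stated in full; the proofs are below) =====
def Claim_equal_project2Dimensions : Prop := ∀ (nodes : List String) (listoftrees : List ((List (String × String)) × (List (String × String)))), Dom_project2Dimensions nodes listoftrees → Pre_project2Dimensions nodes listoftrees → Spec_project2Dimensions nodes listoftrees (project2Dimensions nodes listoftrees)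

-- ===== LEMMAS AND PROOFS =====

-- membership count of v over the distance dicts of ts
def totalCnt (v : String)
    (ts : List ((List (String × String)) × (List (String × String)))) : Int :=
  match ts with
  | [] => 0
  | t :: rest => (if (PySem.Dict.ofList t.1).contains v then 1 else 0) + totalCnt v rest

-- membership count of v over the trees other than index idxc, positions counted from i
def otherCnt (v : String) (idxc i : Nat)
    (ts : List ((List (String × String)) × (List (String × String)))) : Int :=
  match ts with
  | [] => 0
  | t :: rest =>
      (if i ≠ idxc ∧ (PySem.Dict.ofList t.1).contains v then 1 else 0) +
        otherCnt v idxc (i + 1) rest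

lemma otherCnt_nonneg (v : String) (idxc i : Nat) ts : 0 ≤ otherCnt v idxc i ts := by
  induction ts generalizing i with
  | nil => simp [otherCnt]
  | cons t rest ih =>
      simp only [otherCnt]
      have := ih (i + 1)
      split_ifs <;> omega

lemma belongOf_getD (v : String) ts :
    (belongOf ts).getD v 0 = totalCnt v ts := by
  have key : ∀ (l : List ((List (String × String)) × (List (String × String))))
      (d : PySem.Dict String Int),
      (l.foldl (fun d t => ((PySem.Dict.ofList t.1).keys).foldl
        (fun d k => d.insert k (d.getD k 0 + 1)) d) d).getD v 0
      = d.getD v 0 + totalCnt v l := by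
    intro l
    induction l with
    | nil => intro d; simp [totalCnt]
    | cons t rest ih =>
        intro d
        simp only [List.foldl_cons, totalCnt, ih]
        rw [PySem.Dict.getD_foldl_insert_add_one]
        have hnd : ((PySem.Dict.ofList t.1).keys).Nodup := PySem.Dict.nodup_keys_ofList _
        rw [List.nodup_iff_count_le_one] at hnd
        have hle := hnd v
        by_cases h : (PySem.Dict.ofList t.1).contains v
        · have hmem : v ∈ (PySem.Dict.ofList t.1).keys :=
            (PySem.Dict.contains_iff_mem_keys _ _).1 h
          have hge := List.count_pos_iff.2 hmem
          have h1 : ((PySem.Dict.ofList t.1).keys).count v = 1 := by omega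
          rw [h1, if_pos h]
          push_cast
          omega
        · have hmem : v ∉ (PySem.Dict.ofList t.1).keys := by
            intro hm; exact h ((PySem.Dict.contains_iff_mem_keys _ _).2 hm)
          have h0 : ((PySem.Dict.ofList t.1).keys).count v = 0 :=
            List.count_eq_zero.2 hmem
          rw [h0, if_neg h]
          push_cast
          omega
  simpa [belongOf, PySem.Dict.getD_empty] using key ts PySem.Dict.empty

lemma dimcoreAux_eq (n : String) (idxc i : Nat) ts :
    dimcoreAux n idxc i ts = decide (otherCnt n idxc i ts = 0) := by
  induction ts generalizing i with
  | nil => simp [dimcoreAux, otherCnt]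
  | cons t rest ih =>
      simp only [dimcoreAux, otherCnt]
      by_cases h : i ≠ idxc ∧ (PySem.Dict.ofList t.1).contains n = true
      · have hb : ((i != idxc) && (PySem.Dict.ofList t.1).contains n) = true := by
          simp [h.1, h.2]
        rw [hb]
        have hnn := otherCnt_nonneg n idxc (i + 1) rest
        have hne : ¬ ((if i ≠ idxc ∧ (PySem.Dict.ofList t.1).contains n = true
            then (1 : Int) else 0) + otherCnt n idxc (i + 1) rest = 0) := by
          rw [if_pos h]; omega
        simp [hne]
      · have hb : ((i != idxc) && (PySem.Dict.ofList t.1).contains n) = false := by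
          by_cases h1 : i = idxc
          · simp [h1]
          · have h2 : ¬ (PySem.Dict.ofList t.1).contains n = true := fun hc => h ⟨h1, hc⟩
            simp [h2]
        rw [hb]
        simp [if_neg h, ih]

lemma otherCnt_of_lt (v : String) (idxc : Nat) ts :
    ∀ i, idxc < i → otherCnt v idxc i ts = totalCnt v ts := by
  induction ts with
  | nil => intro i _; simp [otherCnt, totalCnt]
  | cons t rest ih =>
      intro i hi
      have hne : i ≠ idxc := by omega
      simp only [otherCnt, totalCnt, ih (i + 1) (by omega)]
      split_ifs with h1 h2 <;> first | rfl | (exfalso; tauto)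

lemma otherCnt_add_idx (v : String) (idxc : Nat) ts :
    ∀ i, i ≤ idxc → (h : idxc - i < ts.length) →
      otherCnt v idxc i ts +
        (if (PySem.Dict.ofList (ts[idxc - i]'h).1).contains v then 1 else 0)
      = totalCnt v ts := by
  induction ts with
  | nil => intro i _ h; simp at h
  | cons t rest ih =>
      intro i hle h
      by_cases hi : i = idxc
      · subst hi
        simp only [Nat.sub_self] at h ⊢
        simp only [otherCnt, totalCnt, List.getElem_cons_zero]
        rw [otherCnt_of_lt v i rest (i + 1) (by omega)]
        simp only [ne_eq, not_true_eq_false, false_and, if_false]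
        abel
      · have hlt : i < idxc := by omega
        have hpos : 0 < idxc - i := by omega
        have h' : idxc - (i + 1) < rest.length := by
          simp only [List.length_cons] at h; omega
        have hget : (t :: rest)[idxc - i]'h = rest[idxc - (i + 1)]'h' := by
          have : idxc - i = (idxc - (i + 1)) + 1 := by omega
          simp [this]
        simp only [otherCnt, totalCnt, hget]
        rw [← ih (i + 1) (by omega) h']
        have hne : i ≠ idxc := by omega
        simp only [hne, ne_eq, not_false_eq_true, true_and]
        abel

-- A's loop condition and B's counter condition agree at every visited node
lemma cond_eq (p : String) (idx : Nat) ts (h : idx < ts.length) :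
    dimcore p (ts[idx]'h).2 idx ts
      = !decide ((belongOf ts).getD p 0 >
          (if (PySem.Dict.ofList (ts[idx]'h).1).contains p then 1 else 0)) := by
  rw [dimcore, dimcoreAux_eq, belongOf_getD]
  have h2 := otherCnt_add_idx p idx ts 0 (Nat.zero_le _) (by simpa using h)
  have h3 := otherCnt_nonneg p idx 0 ts
  simp only [Nat.sub_zero] at h2
  by_cases hz : otherCnt p idx 0 ts = 0
  · simp only [hz, decide_true]
    symm
    simp only [Bool.not_eq_true', decide_eq_false_iff_not]
    split_ifs at h2 ⊢ <;> omega
  · simp only [hz, decide_false]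
    symm
    simp only [Bool.not_eq_false', decide_eq_true_eq]
    split_ifs at h2 ⊢ <;> omega

-- A's threaded walk IS B's pure resolver: same ancestor, and the set it threads is
-- the initial set extended with the resolver's path, element by element
lemma walk_eq (ts : List ((List (String × String)) × (List (String × String))))
    (idx : Nat) (h : idx < ts.length) :
    ∀ (fuel : Nat) (p : String) (nc : PySem.Set String),
      walkA fuel p (ts[idx]'h).2 idx ts nc
        = ((resolveB fuel p (ts[idx]'h).1 (ts[idx]'h).2 (belongOf ts)).1,
           (resolveB fuel p (ts[idx]'h).1 (ts[idx]'h).2 (belongOf ts)).2.foldl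
             PySem.Set.add nc) := by
  intro fuel
  induction fuel with
  | zero => intro p nc; rfl
  | succ f ih =>
      intro p nc
      simp only [walkA, resolveB, cond_eq p idx ts h]
      by_cases hc : ((belongOf ts).getD p 0 >
          (if (PySem.Dict.ofList (ts[idx]'h).1).contains p then 1 else 0))
      · simp only [hc, decide_true, Bool.not_true, Bool.false_eq_true, if_false]
        cases (PySem.Dict.ofList (ts[idx]'h).2).get? p with
        | none => rfl

        | some q => simpa [List.foldl_cons] using ih q (PySem.Set.add nc p)
      · have hd : decide ((belongOf ts).getD p 0 >
            (if (PySem.Dict.ofList (ts[idx]'h).1).contains p then 1 else 0)) = false := by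
          simpa using hc
        rw [hd, if_neg hc]
        simp

-- A's row loop IS a map over B's cells plus a fold of all their paths into the set
lemma row_eq (n : String) alltrees :
    ∀ (ts : List ((List (String × String)) × (List (String × String))))
      (idx : Nat) (nc : PySem.Set String), alltrees.drop idx = ts →
      rowA n idx ts alltrees nc
        = ((rowCellsB n ts (belongOf alltrees)).map Prod.fst,
           ((rowCellsB n ts (belongOf alltrees)).flatMap Prod.snd).foldl
             PySem.Set.add nc) := by
  intro ts
  induction ts with
  | nil => intro idx nc _; rfl
  | cons t rest ih =>
      intro idx nc hdrop
      have hlt : idx < alltrees.length := by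
        have := congrArg List.length hdrop
        simp only [List.length_drop, List.length_cons] at this
        omega
      have hcons := List.drop_eq_getElem_cons hlt
      rw [hdrop] at hcons
      have hget : alltrees[idx]'hlt = t := by
        injection hcons with h1 h2; exact h1.symm
      have hdrop' : alltrees.drop (idx + 1) = rest := by
        injection hcons with h1 h2; exact h2.symm
      simp only [rowA, rowCellsB, List.map_cons, List.flatMap_cons, List.foldl_append,
        List.map_map, cellB]
      have hw := walk_eq alltrees idx hlt ((t.2).length + 1) n nc
      rw [hget] at hw
      by_cases hc : (PySem.Dict.ofList t.1).contains n
      · simp only [if_pos hc, hw]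
        rw [ih (idx + 1) _ hdrop']
        simp [rowCellsB, cellB]
      · simp only [if_neg hc]
        rw [ih (idx + 1) nc hdrop']
        simp [rowCellsB, cellB]

-- the ancestor row of a node, as B computes it (value determined by the key)
def optRow (ts : List ((List (String × String)) × (List (String × String))))
    (n : String) : List (Option String) :=
  (rowCellsB n ts (belongOf ts)).map Prod.fst

-- A's main loop splits: the dict part is a plain insert fold, the set part is the
-- fold of all visited paths (B's flatMap) into the initial set
lemma afold_decomp (ts : List ((List (String × String)) × (List (String × String)))) :
    ∀ (nodes : List String) (dA : PySem.Dict String (List (Option String)))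
      (nc : PySem.Set String),
      nodes.foldl (fun st n =>
          let r := rowA n 0 ts ts st.2
          (st.1.insert n r.1, r.2)) (dA, nc)
      = (nodes.foldl (fun d n => d.insert n (optRow ts n)) dA,
         (nodes.flatMap (fun n => (rowCellsB n ts (belongOf ts)).flatMap Prod.snd)).foldl
           PySem.Set.add nc) := by
  intro nodes
  induction nodes with
  | nil => intro dA nc; rfl
  | cons n ns ih =>
      intro dA nc
      simp only [List.foldl_cons, List.flatMap_cons, List.foldl_append]
      rw [row_eq n ts ts 0 nc (by simp)]
      exact ih _ _

-- inserting a row whose value is determined by its key commutes with A's final filter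
lemma filter_insert_dict
    (T : List ((List (String × String)) × (List (String × String))))
    (dA : PySem.Dict String (List (Option String)))
    (n : String) (v : List (Option String))
    (hval : ∀ kv ∈ dA.items, kv.2 = optRow T kv.1)
    (hv : v = optRow T n) :
    (if setNeNone v then
        (PySem.Dict.mk (dA.items.filter (fun kv => setNeNone kv.2))).insert n v
      else PySem.Dict.mk (dA.items.filter (fun kv => setNeNone kv.2)))
    = PySem.Dict.mk ((dA.insert n v).items.filter (fun kv => setNeNone kv.2)) := by
  have hmapid : ∀ (l : List (String × List (Option String))),
      (∀ kv ∈ l, kv ∈ dA.items) →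
      l.map (fun p => if (p.1 == n) = true then (n, v) else p) = l := by
    intro l hsub
    apply List.map_congr_left ?_ |>.trans l.map_id
    intro p hp
    by_cases hpn : (p.1 == n) = true
    · have h1 : p.1 = n := by simpa using hpn
      have h2 : p.2 = v := by rw [hval p (hsub p hp), h1, hv]
      rw [if_pos hpn, ← h1, ← h2]
      rfl
    · rw [if_neg hpn]
      rfl
  by_cases hcont : dA.contains n = true
  · have hitems : (dA.insert n v).items = dA.items := by
      rw [PySem.Dict.items_insert_of_contains dA v hcont]
      exact hmapid dA.items (fun kv hk => hk)
    rw [hitems]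
    by_cases hpv : setNeNone v = true
    · rw [if_pos hpv]
      -- the filtered dict already holds (n, v); overwriting is the identity
      have hn : n ∈ dA.keys := (PySem.Dict.contains_iff_mem_keys dA n).1 hcont
      obtain ⟨p, hp, hp1⟩ : ∃ p ∈ dA.items, p.1 = n := by
        have : n ∈ dA.items.map Prod.fst := by
          simpa [PySem.Dict.keys] using hn
        simpa using this
      have hpv' : p = (n, v) := by
        have h2 : p.2 = v := by rw [hval p hp, hp1, hv]
        cases p; simp_all
      have hmemf : (n, v) ∈ dA.items.filter (fun kv => setNeNone kv.2) := by
        rw [← hpv']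
        exact List.mem_filter.2 ⟨hp, by rw [hpv']; simpa using hpv⟩
      have hcontf : (PySem.Dict.mk
          (dA.items.filter (fun kv => setNeNone kv.2))).contains n = true := by
        rw [PySem.Dict.contains_mk]
        exact List.any_eq_true.2 ⟨(n, v), hmemf, by simp⟩
      apply PySem.Dict.ext
      rw [PySem.Dict.items_insert_of_contains _ v hcontf]
      exact hmapid _ (fun kv hk => (List.mem_filter.1 hk).1)
    · rw [if_neg hpv]
  · have hcont' : dA.contains n = false := by simpa using hcont
    rw [PySem.Dict.items_insert_of_not_contains dA v hcont', List.filter_append]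
    have hcontf : (PySem.Dict.mk
        (dA.items.filter (fun kv => setNeNone kv.2))).contains n = false := by
      rw [PySem.Dict.contains_mk]
      simp only [List.any_eq_false]
      intro p hp hbeq
      have hp1 : p.1 = n := by simpa using hbeq
      have : p.1 ∈ dA.keys := PySem.Dict.mem_keys_of_mem_items dA (List.mem_filter.1 hp).1
      rw [hp1] at this
      exact (by simpa [hcont'] using (PySem.Dict.contains_iff_mem_keys dA n).2 this)
    by_cases hpv : setNeNone v = true
    · rw [if_pos hpv]
      apply PySem.Dict.ext
      rw [PySem.Dict.items_insert_of_not_contains _ v hcontf]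
      simp [hpv]
    · rw [if_neg hpv]
      simp [hpv]

-- B's conditional-insert fold over the rows IS the filter of A's unconditional fold
lemma dict_loop (T : List ((List (String × String)) × (List (String × String)))) :
    ∀ (nodes : List String) (dA : PySem.Dict String (List (Option String))),
      (∀ kv ∈ dA.items, kv.2 = optRow T kv.1) →
      dA.keys.Nodup →
      nodes.foldl (fun d n =>
          if setNeNone (optRow T n) then d.insert n (optRow T n) else d)
        (PySem.Dict.mk (dA.items.filter (fun kv => setNeNone kv.2)))
      = PySem.Dict.mk ((nodes.foldl (fun d n => d.insert n (optRow T n)) dA).items.filter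
          (fun kv => setNeNone kv.2)) := by
  intro nodes
  induction nodes with
  | nil => intro dA hval hnd; rfl
  | cons n ns ih =>
      intro dA hval hnd
      simp only [List.foldl_cons]
      rw [filter_insert_dict T dA n (optRow T n) hval rfl]
      have hval' : ∀ kv ∈ (dA.insert n (optRow T n)).items, kv.2 = optRow T kv.1 := by
        intro kv hk
        rcases (PySem.Dict.mem_items_insert dA n _ kv).1 hk with h | ⟨h, _⟩
        · rw [h]
        · exact hval kv h
      exact ih _ hval' (PySem.Dict.nodup_keys_insert dA n _ hnd)

-- folding a zip of a list with its own map is folding the list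
lemma zip_map_foldl {α β γ : Type} (l : List α) (f : α → β) (g : γ → α × β → γ)
    (init : γ) :
    (l.zip (l.map f)).foldl g init = l.foldl (fun acc n => g acc (n, f n)) init := by
  induction l generalizing init with
  | nil => rfl
  | cons x xs ih => simp only [List.map_cons, List.zip_cons_cons, List.foldl_cons, ih]

theorem project2Dimensions_spec : Claim_equal_project2Dimensions := by
  intro nodes listoftrees _hdom _hpre
  unfold Spec_project2Dimensions project2Dimensions project2Dimensions_alt
  dsimp only
  rw [afold_decomp]
  rw [zip_map_foldl nodes (fun n => rowCellsB n listoftrees (belongOf listoftrees))]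
  dsimp only
  have hdict := dict_loop listoftrees nodes PySem.Dict.empty
    (by intro kv hk; simp [PySem.Dict.empty] at hk) PySem.Dict.nodup_keys_empty
  have hstart : (PySem.Dict.mk
      ((PySem.Dict.empty : PySem.Dict String (List (Option String))).items.filter
        (fun kv => setNeNone kv.2)))
      = (PySem.Dict.empty : PySem.Dict String (List (Option String))) := rfl
  rw [hstart] at hdict
  simp only [optRow] at hdict
  have hset : PySem.Set.ofList
      ((nodes.map (fun n => rowCellsB n listoftrees (belongOf listoftrees))).flatMap
        (fun row => row.flatMap Prod.snd))
      = (nodes.flatMap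
          (fun n => (rowCellsB n listoftrees (belongOf listoftrees)).flatMap Prod.snd)).foldl
          PySem.Set.add PySem.Set.empty := by
    rw [List.flatMap_map]
    rfl
  rw [hset, hdict]
  simp only [optRow]
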